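-- pv_equiv track=rewrite | github.com/Satniuq/DoReal | 15_arvore_do_pensamento/scripts/gerar_microlinhas_v1.py | mode_preserve_order
-- ===== SOURCE A (Python) =====
-- from collections import Counter
-- from typing import Any, Dict, Iterable, List, Optional, Sequence, Set, Tuple
--
-- def mode_preserve_order(values: Iterable[Optional[str]], ignore: Optional[Set[str]] = None) -> Optional[str]:
--     ignore = ignore or set()
--     filtered: List[str] = []
--     for value in values:
--         if isinstance(value, str):
--             v = value.strip()
--             if v and v not in ignore:
--                 filtered.append(v)
--
--     if not filtered:
--         return None
--
--     counts = Counter(filtered)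
--     best_count = max(counts.values())
--     best_values = {value for value, count in counts.items() if count == best_count}
--
--     for value in filtered:
--         if value in best_values:
--             return value
--     return None
-- ===== SOURCE B (Python) =====
-- def mode_preserve_order(values, ignore=None):
--     ignored = ignore or set()
--     counts = {}
--     for value in values:
--         if isinstance(value, str):
--             v = value.strip()
--             if v and v not in ignored:
--                 counts[v] = counts.get(v, 0) + 1
--     if not counts:
--         return None
--     return max(counts, key=counts.get)
-- ===== Notes on version B (the rewrite author's own statement) =====
-- stated objective: simpler
-- what changed: One counting pass into a dict replaces A's filtered-list build, Counter, best-count max, best-value set and order-preserving rescan; the result is max over the dict keys by count, where dict insertion order (first-seen) plus max's first-wins tie rule reproduces A's earliest-occurrence tie-break.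
import Mathlib
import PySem

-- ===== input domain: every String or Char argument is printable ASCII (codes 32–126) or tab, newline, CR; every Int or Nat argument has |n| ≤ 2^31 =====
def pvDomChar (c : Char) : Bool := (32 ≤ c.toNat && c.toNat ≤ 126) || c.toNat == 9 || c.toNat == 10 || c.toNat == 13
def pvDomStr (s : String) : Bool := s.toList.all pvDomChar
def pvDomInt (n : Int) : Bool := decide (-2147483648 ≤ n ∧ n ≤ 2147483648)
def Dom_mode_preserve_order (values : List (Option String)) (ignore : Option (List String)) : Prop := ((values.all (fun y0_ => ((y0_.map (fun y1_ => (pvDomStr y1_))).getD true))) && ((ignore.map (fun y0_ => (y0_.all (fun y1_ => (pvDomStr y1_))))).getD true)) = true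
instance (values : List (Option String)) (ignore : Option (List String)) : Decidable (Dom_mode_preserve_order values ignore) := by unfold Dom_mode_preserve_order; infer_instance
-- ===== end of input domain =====

-- B replaces A's four passes (filter list, Counter, max count, best-value set, rescan) by one
-- counting pass into a dict plus a single max over its keys by count (objective: simpler).

-- ===== PORT A =====
-- one body of A's filtering loop: 'if isinstance(value, str): v = value.strip(); if v and v not in ignore: filtered.append(v)'
def pvKeepStep (ig : List String) (acc : List String) (ov : Option String) : List String :=
  match ov with
  | some value =>
      let v := PySem.Str.strip value
      if v ≠ "" ∧ ¬ ig.contains v then acc ++ [v] else acc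
  | none => acc

def mode_preserve_order (values : List (Option String)) (ignore : Option (List String)) : Option String :=
  let ig := ignore.getD []          -- 'ignore = ignore or set()'
  let filtered := values.foldl (pvKeepStep ig) []
  if filtered = [] then none
  else
    let counts := PySem.Dict.counter filtered
    match PySem.List.max? counts.values (fun c => c) with   -- 'best_count = max(counts.values())'
    | none => none   -- unreachable totality guard: counts is nonempty here
    | some bestCount =>
      -- 'best_values = {value for value, count in counts.items() if count == best_count}'
      let bestValues := counts.items.foldl
        (fun s p => if p.2 == bestCount then PySem.Set.add s p.1 else s) PySem.Set.empty
      -- 'for value in filtered: if value in best_values: return value' / trailing 'return None'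
      filtered.find? (fun v => PySem.Set.contains bestValues v)

-- ===== PORT B =====
-- one body of B's counting loop: 'if isinstance(value, str): v = value.strip(); if v and v not in ignored: counts[v] = counts.get(v, 0) + 1'
def pvTallyStep (ig : List String) (d : PySem.Dict String Int) (ov : Option String) : PySem.Dict String Int :=
  match ov with
  | some value =>
      let v := PySem.Str.strip value
      if v ≠ "" ∧ ¬ ig.contains v then d.modify v 0 (· + 1) else d
  | none => d

def mode_preserve_order_alt (values : List (Option String)) (ignore : Option (List String)) : Option String :=
  let _ig := ignore.getD []          -- 'ignored = ignore or set()'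
  let counts := values.foldl (pvTallyStep _ig) PySem.Dict.empty
  if counts.keys = [] then none      -- 'if not counts: return None'
  else PySem.List.max? counts.keys (fun k => counts.getD k 0)
  -- 'max(counts, key=counts.get)': every key is present in counts, so counts.get k = getD k 0 exactly

-- ===== PRECONDITION & SPEC =====
def Spec_mode_preserve_order (values : List (Option String)) (ignore : Option (List String)) (out : Option String) : Prop := out = mode_preserve_order_alt values ignore
instance (values : List (Option String)) (ignore : Option (List String)) (out : Option String) : Decidable (Spec_mode_preserve_order values ignore out) := by unfold Spec_mode_preserve_order; infer_instance

-- ===== CLAIM (what is proved, stated in full; the proofs are below) =====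
def Claim_equal_mode_preserve_order : Prop := ∀ (values : List (Option String)) (ignore : Option (List String)), Dom_mode_preserve_order values ignore → Spec_mode_preserve_order values ignore (mode_preserve_order values ignore)

-- ===== LEMMAS AND PROOFS =====

-- what one input contributes to the filtered list
def pvKeepF (ig : List String) (ov : Option String) : List String :=
  match ov with
  | some value =>
      let v := PySem.Str.strip value
      if v ≠ "" ∧ ¬ ig.contains v then [v] else []
  | none => []

theorem pvKeepStep_eq (ig : List String) (acc : List String) (ov : Option String) :
    pvKeepStep ig acc ov = acc ++ pvKeepF ig ov := by
  cases ov with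
  | none => simp [pvKeepStep, pvKeepF]
  | some value =>
      simp only [pvKeepStep, pvKeepF]
      split <;> simp

theorem filtered_eq (ig : List String) (values : List (Option String)) :
    values.foldl (pvKeepStep ig) [] = values.flatMap (pvKeepF ig) := by
  have h : pvKeepStep ig = fun acc ov => acc ++ pvKeepF ig ov := by
    funext acc ov; exact pvKeepStep_eq ig acc ov
  rw [h, PySem.List.foldl_append_eq_flatMap]
  simp

theorem pvTallyStep_eq (ig : List String) (d : PySem.Dict String Int) (ov : Option String) :
    pvTallyStep ig d ov = (pvKeepF ig ov).foldl (fun d x => d.modify x 0 (· + 1)) d := by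
  cases ov with
  | none => simp [pvTallyStep, pvKeepF]
  | some value =>
      simp only [pvTallyStep, pvKeepF]
      split <;> simp [List.foldl]

theorem tally_eq (ig : List String) :
    ∀ (values : List (Option String)) (d : PySem.Dict String Int),
      values.foldl (pvTallyStep ig) d
        = (values.flatMap (pvKeepF ig)).foldl (fun d x => d.modify x 0 (· + 1)) d := by
  intro values
  induction values with
  | nil => intro d; simp
  | cons ov t ih =>
      intro d
      simp only [List.foldl_cons, List.flatMap_cons, List.foldl_append]
      rw [pvTallyStep_eq, ih]

theorem countsB_eq (ig : List String) (values : List (Option String)) :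
    values.foldl (pvTallyStep ig) PySem.Dict.empty
      = PySem.Dict.counter (values.flatMap (pvKeepF ig)) := by
  rw [tally_eq]; rfl

-- the running max keeps the earlier element on ties and folds pairwise from the left
theorem max?_cons_cons {α : Type} (key : α → Int) (a x : α) (t : List α) :
    PySem.List.max? (a :: x :: t) key
      = PySem.List.max? ((if key a < key x then x else a) :: t) key := by
  unfold PySem.List.max?
  simp only [List.foldl_cons]
  congr 1
  split <;> rfl

theorem max?_singleton {α : Type} (key : α → Int) (a : α) :
    PySem.List.max? [a] key = some a := rfl

-- max? over the mapped keys is the key of max?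
theorem max?_map {α : Type} (key : α → Int) :
    ∀ (t : List α) (a : α),
      PySem.List.max? ((a :: t).map key) (fun c => c)
        = (PySem.List.max? (a :: t) key).map key := by
  intro t
  induction t with
  | nil => intro a; simp [max?_singleton]
  | cons x t' ih =>
      intro a
      have hk : (if key a < key x then key x else key a) = key (if key a < key x then x else a) := by
        split <;> rfl
      calc PySem.List.max? ((a :: x :: t').map key) (fun c => c)
          = PySem.List.max? (key a :: key x :: t'.map key) (fun c => c) := by simp
        _ = PySem.List.max? ((if key a < key x then key x else key a) :: t'.map key) (fun c => c) :=
            max?_cons_cons (fun c => c) (key a) (key x) (t'.map key)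
        _ = PySem.List.max? (((if key a < key x then x else a) :: t').map key) (fun c => c) := by
            rw [hk]; simp
        _ = (PySem.List.max? ((if key a < key x then x else a) :: t') key).map key := ih _
        _ = (PySem.List.max? (a :: x :: t') key).map key := by rw [← max?_cons_cons]

theorem max?_values {α : Type} (key : α → Int) (xs : List α) :
    PySem.List.max? (xs.map key) (fun c => c) = (PySem.List.max? xs key).map key := by
  cases xs with
  | nil => rfl
  | cons a t => exact max?_map key t a

-- max? returns the FIRST element attaining the maximal key
theorem max?_first' {α : Type} (key : α → Int) :
    ∀ (t : List α) (a m : α), PySem.List.max? (a :: t) key = some m →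
      (∀ y ∈ a :: t, key y ≤ key m) ∧ (a :: t).find? (fun x => key x == key m) = some m := by
  intro t
  induction t with
  | nil =>
      intro a m h
      rw [max?_singleton, Option.some_inj] at h
      subst h
      refine ⟨by simp, ?_⟩
      exact List.find?_cons_of_pos (by simp)
  | cons x t' ih =>
      intro a m h
      rw [max?_cons_cons] at h
      by_cases hax : key a < key x
      · rw [if_pos hax] at h
        obtain ⟨hb, hf⟩ := ih x m h
        have ham : key a < key m := lt_of_lt_of_le hax (hb x List.mem_cons_self)
        constructor
        · intro y hy
          rcases List.mem_cons.mp hy with rfl | hy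
          · exact le_of_lt ham
          · exact hb y hy
        · rw [List.find?_cons_of_neg (by simp [beq_iff_eq]; omega)]
          exact hf
      · rw [if_neg hax] at h
        obtain ⟨hb, hf⟩ := ih a m h
        have ham : key a ≤ key m := hb a List.mem_cons_self
        have hxa : key x ≤ key a := le_of_not_gt hax
        constructor
        · intro y hy
          rcases List.mem_cons.mp hy with rfl | hy
          · exact ham
          · rcases List.mem_cons.mp hy with rfl | hy
            · exact le_trans hxa ham
            · exact hb y (List.mem_cons.mpr (Or.inr hy))
        · by_cases ha : (key a == key m) = true
          · have h1 : (a :: t').find? (fun x => key x == key m) = some a :=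
              List.find?_cons_of_pos (p := fun x => key x == key m) ha
            have h2 : some a = some m := h1 ▸ hf
            rw [List.find?_cons_of_pos (p := fun x => key x == key m) ha]
            exact h2
          · have ha' : ¬ key a = key m := by simpa [beq_iff_eq] using ha
            have hxm : ¬ (key x == key m) = true := by
              simp only [beq_iff_eq]
              intro hxe
              exact ha' (le_antisymm ham (hxe ▸ hxa))
            have hf' : t'.find? (fun x => key x == key m) = some m := by
              rw [List.find?_cons_of_neg (p := fun x => key x == key m) ha] at hf
              exact hf
            rw [List.find?_cons_of_neg (p := fun x => key x == key m) ha, List.find?_cons_of_neg (p := fun x => key x == key m) hxm]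
            exact hf'

theorem max?_find? {α : Type} (key : α → Int) (xs : List α) (m : α)
    (h : PySem.List.max? xs key = some m) :
    xs.find? (fun x => key x == key m) = some m := by
  cases xs with
  | nil => exact absurd h (by simp [PySem.List.max?])
  | cons a t => exact (max?_first' key t a m h).2

-- membership in A's best-value set
theorem bestSet_mem (b : Int) :
    ∀ (ps : List (String × Int)) (s : PySem.Set String) (v : String),
      v ∈ ps.foldl (fun s p => if p.2 == b then PySem.Set.add s p.1 else s) s
        ↔ v ∈ s ∨ ∃ p ∈ ps, p.2 = b ∧ p.1 = v := by
  intro ps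
  induction ps with
  | nil => intro s v; simp
  | cons p t ih =>
      intro s v
      simp only [List.foldl_cons]
      by_cases hp : (p.2 == b) = true
      · rw [if_pos hp, ih]
        rw [beq_iff_eq] at hp
        simp only [PySem.Set.mem_add]
        constructor
        · rintro (⟨hs | rfl⟩ | ⟨q, hq, hqb, hqv⟩)
          · exact Or.inl hs
          · exact Or.inr ⟨p, List.mem_cons_self, hp, rfl⟩
          · exact Or.inr ⟨q, List.mem_cons.mpr (Or.inr hq), hqb, hqv⟩
        · rintro (hs | ⟨q, hq, hqb, hqv⟩)
          · exact Or.inl (Or.inl hs)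
          · rcases List.mem_cons.mp hq with rfl | hq
            · exact Or.inl (Or.inr hqv.symm)
            · exact Or.inr ⟨q, hq, hqb, hqv⟩
      · rw [if_neg hp, ih]
        rw [beq_iff_eq] at hp
        constructor
        · rintro (hs | ⟨q, hq, hqb, hqv⟩)
          · exact Or.inl hs
          · exact Or.inr ⟨q, List.mem_cons.mpr (Or.inr hq), hqb, hqv⟩
        · rintro (hs | ⟨q, hq, hqb, hqv⟩)
          · exact Or.inl hs
          · rcases List.mem_cons.mp hq with rfl | hq
            · exact absurd hqb hp
            · exact Or.inr ⟨q, hq, hqb, hqv⟩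

theorem find?_congr_mem {α : Type} :
    ∀ (l : List α) (p q : α → Bool), (∀ x ∈ l, p x = q x) → l.find? p = l.find? q := by
  intro l
  induction l with
  | nil => intro p q _; rfl
  | cons x t ih =>
      intro p q h
      have hx := h x List.mem_cons_self
      have ht := ih p q (fun y hy => h y (List.mem_cons.mpr (Or.inr hy)))
      cases hq : q x
      · rw [List.find?_cons_of_neg (by simp [hx, hq]), List.find?_cons_of_neg (by simp [hq]), ht]
      · rw [List.find?_cons_of_pos (by simp [hx, hq]), List.find?_cons_of_pos hq]

-- find? over set(l) (first occurrences, in order) agrees with find? over l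
theorem find?_foldl_add {α : Type} [BEq α] [LawfulBEq α] (p : α → Bool) :
    ∀ (l : List α) (s : PySem.Set α),
      (List.foldl PySem.Set.add s l).find? p
        = ((s.find? p).or ((l.filter (fun x => !PySem.Set.contains s x)).find? p)) := by
  intro l
  induction l with
  | nil => intro s; simp
  | cons x t ih =>
      intro s
      simp only [List.foldl_cons]
      rw [ih]
      by_cases hx : x ∈ s
      · have hcx : PySem.Set.contains s x = true := (PySem.Set.contains_iff s x).mpr hx
        have hadd : PySem.Set.add s x = s := by simp [PySem.Set.add, hx]
        rw [hadd, List.filter_cons, hcx]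
        simp
      · have hcx : PySem.Set.contains s x = false := by
          rw [← Bool.not_eq_true]
          intro hc
          exact hx ((PySem.Set.contains_iff s x).mp hc)
        have hadd : PySem.Set.add s x = s ++ [x] := by simp [PySem.Set.add, hx]
        have hfc : List.filter (fun y => !PySem.Set.contains s y) (x :: t)
            = x :: List.filter (fun y => !PySem.Set.contains s y) t := by
          rw [List.filter_cons, hcx]
          simp
        rw [hadd, hfc]
        rw [List.find?_append, Option.or_assoc]
        congr 1
        have hcontains : ∀ y, PySem.Set.contains (s ++ [x]) y = (PySem.Set.contains s y || x == y) := by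
          intro y
          by_cases h1 : y ∈ s
          · simp [PySem.Set.contains, List.mem_append, h1]
          · by_cases h2 : x = y
            · subst h2
              simp [PySem.Set.contains, List.mem_append, h1]
            · have h3 : ¬ y ∈ s ++ [x] := by
                simp [List.mem_append, h1, Ne.symm h2]
              simp [PySem.Set.contains, h3, h1, h2]
        simp only [hcontains]
        by_cases hpx : p x = true
        · rw [List.find?_cons_of_pos hpx, List.find?_cons_of_pos hpx]
          rfl
        · have hpx' : p x = false := by simpa using hpx
          rw [List.find?_cons_of_neg (by simp [hpx']), List.find?_cons_of_neg (by simp [hpx'])]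
          simp only [List.find?_nil, Option.none_or]
          rw [List.find?_filter, List.find?_filter]
          apply find?_congr_mem
          intro y _
          by_cases hxy : x = y
          · subst hxy
            simp [hpx']
          · have hb : (x == y) = false := by simp [hxy]
            simp [hb]

theorem find?_ofList {α : Type} [BEq α] [LawfulBEq α] (p : α → Bool) (l : List α) :
    (PySem.Set.ofList l : List α).find? p = l.find? p := by
  rw [PySem.Set.ofList, find?_foldl_add]
  have h1 : (PySem.Set.empty : List α).find? p = none := rfl
  rw [h1, Option.none_or]
  have h2 : l.filter (fun x => !PySem.Set.contains (PySem.Set.empty : PySem.Set α) x) = l := by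
    apply List.filter_eq_self.mpr
    intro a _
    rfl
  rw [h2]

theorem ofList_ne_nil {α : Type} [BEq α] [LawfulBEq α] {l : List α} (h : l ≠ []) :
    (PySem.Set.ofList l : List α) ≠ [] := by
  obtain ⟨x, hx⟩ := List.exists_mem_of_ne_nil l h
  intro hc
  have hm := (PySem.Set.mem_ofList l x).mpr hx
  rw [hc] at hm
  exact List.not_mem_nil hm

-- ===== VERDICT (by name: the statement is the Claim_ definition above) =====
theorem mode_preserve_order_spec : Claim_equal_mode_preserve_order := by
  intro values ignore _dom
  unfold Spec_mode_preserve_order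
  simp only [mode_preserve_order, mode_preserve_order_alt]
  rw [filtered_eq, countsB_eq]
  generalize (values.flatMap (pvKeepF (ignore.getD []))) = l
  by_cases hnil : l = []
  · subst hnil
    rw [if_pos rfl]
    have hk : (PySem.Dict.counter ([] : List String)).keys = [] := rfl
    rw [hk, if_pos rfl]
  · rw [if_neg hnil]
    have hK : (PySem.Dict.counter l).keys = PySem.Set.ofList l := PySem.Dict.keys_counter l
    have hKne : (PySem.Set.ofList l : List String) ≠ [] := ofList_ne_nil hnil
    rw [hK, if_neg hKne]
    have hkey : (fun k => (PySem.Dict.counter l).getD k 0) = fun k => ((l.count k : Int)) := by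
      funext k
      exact PySem.Dict.getD_counter l k
    rw [hkey]
    obtain ⟨m, hm⟩ : ∃ m, PySem.List.max? (PySem.Set.ofList l : List String)
        (fun k => ((l.count k : Int))) = some m := by
      cases hmx : PySem.List.max? (PySem.Set.ofList l : List String)
          (fun k => ((l.count k : Int))) with
      | none => exact absurd ((PySem.List.max?_eq_none_iff _ _).mp hmx) hKne
      | some m => exact ⟨m, rfl⟩
    have hvals : (PySem.Dict.counter l).values
        = (PySem.Set.ofList l : List String).map (fun k => ((l.count k : Int))) := by
      rw [PySem.Dict.values, PySem.Dict.items_counter, List.map_map]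
      rfl
    have hbest : PySem.List.max? (PySem.Dict.counter l).values (fun c => c)
        = some ((l.count m : Int)) := by
      rw [hvals, max?_values, hm]
      rfl
    rw [hm]
    have hitems : (PySem.Dict.counter l).items
        = (PySem.Set.ofList l : List String).map (fun k => (k, ((l.count k : Int)))) :=
      PySem.Dict.items_counter l
    have hpred : ∀ v ∈ l,
        (PySem.Set.contains ((PySem.Dict.counter l).items.foldl
          (fun s p => if p.2 == ((l.count m : Int)) then PySem.Set.add s p.1 else s)
          PySem.Set.empty) v)
        = (((l.count v : Int)) == ((l.count m : Int))) := by
      intro v hv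
      have hmemK : v ∈ (PySem.Set.ofList l : List String) := (PySem.Set.mem_ofList l v).mpr hv
      have hiff : v ∈ ((PySem.Dict.counter l).items.foldl
          (fun s p => if p.2 == ((l.count m : Int)) then PySem.Set.add s p.1 else s)
          PySem.Set.empty)
          ↔ ((l.count v : Int)) = ((l.count m : Int)) := by
        rw [bestSet_mem]
        constructor
        · rintro (hs | ⟨q, hq, hqb, hqv⟩)
          · exact absurd hs List.not_mem_nil
          · rw [hitems] at hq
            obtain ⟨k, _, hk⟩ := List.mem_map.mp hq
            rw [← hqv, ← hk]
            rw [← hk] at hqb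
            exact hqb
        · intro hc
          refine Or.inr ⟨(v, ((l.count v : Int))), ?_, hc, rfl⟩
          rw [hitems]
          exact List.mem_map.mpr ⟨v, hmemK, rfl⟩
      by_cases hc : ((l.count v : Int)) = ((l.count m : Int))
      · have h1 : (((l.count v : Int)) == ((l.count m : Int))) = true := by simp [hc]
        have h2 := (PySem.Set.contains_iff _ v).mpr (hiff.mpr hc)
        rw [h1, h2]
      · have h1 : (((l.count v : Int)) == ((l.count m : Int))) = false := by simp [hc]
        have h2 : PySem.Set.contains ((PySem.Dict.counter l).items.foldl
            (fun s p => if p.2 == ((l.count m : Int)) then PySem.Set.add s p.1 else s)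
            PySem.Set.empty) v = false := by
          rw [← Bool.not_eq_true]
          intro hcon
          exact hc (hiff.mp ((PySem.Set.contains_iff _ v).mp hcon))
        rw [h1, h2]
    cases hmatch : PySem.List.max? (PySem.Dict.counter l).values (fun c => c) with
    | none =>
        rw [hbest] at hmatch
        exact absurd hmatch (by simp)
    | some b =>
        have hb : b = ((l.count m : Int)) := by
          rw [hbest] at hmatch
          exact (Option.some_inj.mp hmatch).symm
        subst hb
        simp only []
        rw [find?_congr_mem l _ (fun v => ((l.count v : Int)) == ((l.count m : Int))) hpred]
        rw [← find?_ofList (fun v => ((l.count v : Int)) == ((l.count m : Int))) l]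
        exact max?_find? (fun k => ((l.count k : Int))) _ m hm
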